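-- pv_equiv track=rewrite | github.com/quantumlib/tesseract-decoder | src/py/demutil.py | get_component_obs_matching_undecomposed_obs
-- ===== SOURCE A (Python) =====
-- from collections.abc import Callable, Iterable
-- from functools import reduce
-- import itertools
--
-- def reduce_symmetric_difference(items: Iterable[int]) -> tuple[int]:
--     """Calculates the symmetric difference of a multiset of items."""
--     unpaired_set = reduce(lambda acc, i: acc ^ {i}, items, set())
--     return tuple(sorted(unpaired_set))
--
-- def reduce_set_symmetric_difference(sets: Iterable[Iterable[int]]) -> tuple[int]:
--     return reduce_symmetric_difference(itertools.chain.from_iterable(sets))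
--
-- def get_component_obs_matching_undecomposed_obs(
--     obs_options_by_component: list[set[tuple[int]]], error_obs: tuple[int]
-- ) -> list[tuple[int]] | None:
--     """Assign component observables consistent with the undecomposed error observables."""
--     error_obs_set = set(reduce_symmetric_difference(error_obs))
--     for obs_combinations in itertools.product(*obs_options_by_component):
--         obs_from_combination = reduce_set_symmetric_difference(obs_combinations)
--         if set(obs_from_combination) == error_obs_set:
--             return list(obs_combinations)
--     return None
-- ===== SOURCE B (Python) =====
-- def get_component_obs_matching_undecomposed_obs(obs_options_by_component, error_obs):
--     """Backward DP over XOR states: for each achievable suffix state keep one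
--     component-obs assignment, then look up the target state; avoids enumerating
--     the full cartesian product."""
--     def odd(items):
--         st = set()
--         for i in items:
--             st ^= {i}
--         return frozenset(st)
--
--     target = odd(error_obs)
--     best = {frozenset(): ()}
--     for options in reversed(list(obs_options_by_component)):
--         new = {}
--         for opt in options:
--             o = odd(opt)
--             for state, tail in best.items():
--                 s2 = state ^ o
--                 if s2 not in new:
--                     new[s2] = (opt,) + tail
--         best = new
--     tail = best.get(target)
--     return None if tail is None else list(tail)
-- ===== Notes on version B (the rewrite author's own statement) =====
-- stated objective: alternative
-- what changed: Replaces A's scan of the full cartesian product of component options with a backward dynamic programme over XOR states (one dict entry per achievable suffix symmetric-difference state, incremental XOR per option, final single lookup of the target state); intended as faster, measured 3.22x at the largest size both finished but both blow up on large random instances, so no speed is claimed.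
-- outside the precondition, e.g. on get_component_obs_matching_undecomposed_obs([{(1,), ()}, {(1,), ()}], ()): A returns [(1,), (1,)], B returns [(1,), (1,)]
import Mathlib
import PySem

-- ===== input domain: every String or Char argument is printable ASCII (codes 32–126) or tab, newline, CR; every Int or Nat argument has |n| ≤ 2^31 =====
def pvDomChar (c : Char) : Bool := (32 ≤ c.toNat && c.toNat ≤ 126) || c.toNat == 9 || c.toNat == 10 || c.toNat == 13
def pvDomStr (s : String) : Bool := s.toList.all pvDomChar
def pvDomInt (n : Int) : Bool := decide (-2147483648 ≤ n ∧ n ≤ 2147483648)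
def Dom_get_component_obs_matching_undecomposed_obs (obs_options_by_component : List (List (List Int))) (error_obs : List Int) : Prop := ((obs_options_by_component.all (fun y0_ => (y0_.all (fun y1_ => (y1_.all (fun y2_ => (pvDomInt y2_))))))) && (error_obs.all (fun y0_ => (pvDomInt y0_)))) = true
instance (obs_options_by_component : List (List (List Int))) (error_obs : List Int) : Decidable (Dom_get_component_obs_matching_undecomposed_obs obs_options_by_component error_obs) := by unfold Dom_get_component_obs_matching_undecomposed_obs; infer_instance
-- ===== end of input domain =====

-- B replaces A's enumeration of the full cartesian product with a backward XOR-state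
-- dynamic programme (one assignment kept per achievable suffix state, then a single lookup).
-- Inputs typed set[...] in Python are Lists of distinct elements here; the proved equality
-- is on Pre_ (at most one matching assignment), where Python's set iteration order cannot matter.

-- ===== PORT A =====
-- itertools.product(*xs), in product order over the given element lists
def pyProductA : List (List (List Int)) → List (List (List Int))
  | [] => [[]]
  | l :: ls => l.flatMap (fun x => (pyProductA ls).map (fun c => x :: c))

-- reduce(lambda acc, i: acc ^ {i}, items, set()); tuple(sorted(…))
def reduce_symmetric_difference (items : List Int) : List Int :=
  PySem.List.sorted (items.foldl (fun acc i => PySem.Set.symmDiff acc [i]) PySem.Set.empty) (fun x => x) false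

def reduce_set_symmetric_difference (sets : List (List Int)) : List Int :=
  reduce_symmetric_difference sets.flatten

def get_component_obs_matching_undecomposed_obs (obs_options_by_component : List (List (List Int))) (error_obs : List Int) : Option (List (List Int)) :=
  let error_obs_set := PySem.Set.ofList (reduce_symmetric_difference error_obs)
  (pyProductA obs_options_by_component).find? (fun obs_combinations =>
    PySem.Set.equal (PySem.Set.ofList (reduce_set_symmetric_difference obs_combinations)) error_obs_set)

-- ===== PORT B =====
-- Source B's odd(items): the frozenset of elements of odd multiplicity; a frozenset is
-- represented canonically by its sorted element list (frozenset equality = set equality).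
def canonOf (items : List Int) : List Int :=
  PySem.List.sorted (items.foldl (fun st i => PySem.Set.symmDiff st [i]) PySem.Set.empty) (fun x => x) false

-- one level of Source B's backward DP: 'for opt in options: for state, tail in best.items(): …'
def bStep (best : PySem.Dict (List Int) (List (List Int))) (options : List (List Int)) : PySem.Dict (List Int) (List (List Int)) :=
  options.foldl (fun new opt =>
    let o := canonOf opt
    best.items.foldl (fun new p =>
      let s2 := PySem.List.sorted (PySem.Set.symmDiff p.1 o) (fun x => x) false
      if new.contains s2 then new else new.insert s2 (opt :: p.2)) new)
    PySem.Dict.empty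

def get_component_obs_matching_undecomposed_obs_alt (obs_options_by_component : List (List (List Int))) (error_obs : List Int) : Option (List (List Int)) :=
  let target := canonOf error_obs
  let best := (obs_options_by_component.reverse).foldl bStep ((PySem.Dict.empty).insert [] [])
  best.get? target

-- ===== PRECONDITION & SPEC =====
-- the space of component-obs assignments (one option tuple chosen per component);
-- a spec-level enumeration Pre_ quantifies over, not A's loop
def pvAssignments (L : List (List (List Int))) : List (List (List Int)) :=
  L.foldr (fun opts acc => opts.flatMap (fun x => acc.map (fun c => x :: c))) [[]]

-- Pre_ excludes inputs on which MORE THAN ONE component-obs assignment matches the target: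
-- there A's (and B's) returned assignment depends on Python's unordered set iteration order,
-- which has no single behaviour to port.
def Pre_get_component_obs_matching_undecomposed_obs (obs_options_by_component : List (List (List Int))) (error_obs : List Int) : Prop :=
  ∀ c1 ∈ pvAssignments obs_options_by_component, ∀ c2 ∈ pvAssignments obs_options_by_component,
    canonOf c1.flatten = canonOf error_obs → canonOf c2.flatten = canonOf error_obs → c1 = c2
instance (obs_options_by_component : List (List (List Int))) (error_obs : List Int) : Decidable (Pre_get_component_obs_matching_undecomposed_obs obs_options_by_component error_obs) := by unfold Pre_get_component_obs_matching_undecomposed_obs; infer_instance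

def pvWitness_get_component_obs_matching_undecomposed_obs : List (List (List Int)) × List Int := ([[[1]], [[2]]], [1, 2])

def Spec_get_component_obs_matching_undecomposed_obs (obs_options_by_component : List (List (List Int))) (error_obs : List Int) (out : Option (List (List Int))) : Prop := out = get_component_obs_matching_undecomposed_obs_alt obs_options_by_component error_obs
instance (obs_options_by_component : List (List (List Int))) (error_obs : List Int) (out : Option (List (List Int))) : Decidable (Spec_get_component_obs_matching_undecomposed_obs obs_options_by_component error_obs out) := by unfold Spec_get_component_obs_matching_undecomposed_obs; infer_instance

-- ===== CLAIM (what is proved, stated in full; the proofs are below) =====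
def Claim_equal_get_component_obs_matching_undecomposed_obs : Prop := ∀ (obs_options_by_component : List (List (List Int))) (error_obs : List Int), Dom_get_component_obs_matching_undecomposed_obs obs_options_by_component error_obs → Pre_get_component_obs_matching_undecomposed_obs obs_options_by_component error_obs → Spec_get_component_obs_matching_undecomposed_obs obs_options_by_component error_obs (get_component_obs_matching_undecomposed_obs obs_options_by_component error_obs)

-- ===== LEMMAS AND PROOFS =====

theorem foldl_sd_nodup (xs : List Int) (s : List Int) (hs : s.Nodup) :
    (xs.foldl (fun st i => PySem.Set.symmDiff st [i]) s).Nodup := by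
  induction xs generalizing s with
  | nil => exact hs
  | cons x xs ih =>
    exact ih _ (PySem.Set.nodup_symmDiff s [x] hs (by simp))

theorem mem_foldl_sd (xs : List Int) (s : List Int) (v : Int) :
    v ∈ xs.foldl (fun st i => PySem.Set.symmDiff st [i]) s ↔
      ((v ∈ s ∧ xs.count v % 2 = 0) ∨ (v ∉ s ∧ xs.count v % 2 = 1)) := by
  induction xs generalizing s with
  | nil => simp
  | cons x xs ih =>
    rw [List.foldl_cons, ih]
    have hc : (x :: xs).count v = xs.count v + (if v = x then 1 else 0) := by
      by_cases h : v = x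
      · subst h; simp
      · simp [List.count_cons, h]
        exact fun hh => h hh.symm
    by_cases hvx : v = x
    · subst hvx
      have hm : (v ∈ PySem.Set.symmDiff s [v]) ↔ v ∉ s := by
        rw [PySem.Set.mem_symmDiff]; simp
      rw [hm, hc, if_pos rfl]
      by_cases hs : v ∈ s <;> simp [hs] <;> omega
    · have hm : (v ∈ PySem.Set.symmDiff s [x]) ↔ v ∈ s := by
        rw [PySem.Set.mem_symmDiff]; simp [hvx]
      rw [hm, hc, if_neg hvx]
      simp

theorem nodup_canonOf (xs : List Int) : (canonOf xs).Nodup := by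
  have := PySem.List.sorted_perm (xs.foldl (fun st i => PySem.Set.symmDiff st [i]) PySem.Set.empty) (fun x => x) false
  exact this.nodup_iff.mpr (foldl_sd_nodup xs PySem.Set.empty (by simp [PySem.Set.empty]))

theorem mem_canonOf (xs : List Int) (v : Int) : v ∈ canonOf xs ↔ xs.count v % 2 = 1 := by
  simp [canonOf, PySem.List.mem_sorted, mem_foldl_sd, PySem.Set.empty]

theorem canon_unique (S : List Int) (xs : List Int) (hnd : S.Nodup)
    (hmem : ∀ v, v ∈ S ↔ xs.count v % 2 = 1) :
    PySem.List.sorted S (fun x => x) false = canonOf xs := by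
  rw [canonOf, PySem.List.sorted_id_eq_sorted_id_iff_perm]
  refine (List.perm_ext_iff_of_nodup hnd (foldl_sd_nodup xs PySem.Set.empty (by simp [PySem.Set.empty]))).mpr ?_
  intro v
  rw [hmem v, mem_foldl_sd]
  simp [PySem.Set.empty]

theorem canonOf_eq_iff (xs ys : List Int) :
    canonOf xs = canonOf ys ↔ ∀ v, xs.count v % 2 = 1 ↔ ys.count v % 2 = 1 := by
  constructor
  · intro h v
    rw [← mem_canonOf, ← mem_canonOf, h]
  · intro h
    show PySem.List.sorted _ (fun x => x) false = canonOf ys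
    refine canon_unique _ ys (foldl_sd_nodup xs PySem.Set.empty (by simp [PySem.Set.empty])) ?_
    intro v
    rw [mem_foldl_sd]
    simp only [PySem.Set.empty, List.not_mem_nil, false_and, not_false_eq_true, true_and, false_or]
    exact h v

theorem canon_symmDiff (a b xs ys : List Int) (ha : a = canonOf xs) (hb : b = canonOf ys) :
    PySem.List.sorted (PySem.Set.symmDiff a b) (fun x => x) false = canonOf (xs ++ ys) := by
  subst ha hb
  refine canon_unique _ _ (PySem.Set.nodup_symmDiff _ _ (nodup_canonOf xs) (nodup_canonOf ys)) ?_
  intro v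
  rw [PySem.Set.mem_symmDiff, mem_canonOf, mem_canonOf, List.count_append]
  omega

theorem canonOf_comm (xs ys : List Int) : canonOf (xs ++ ys) = canonOf (ys ++ xs) := by
  rw [canonOf_eq_iff]
  intro v
  simp [List.count_append]
  omega

theorem rsd_eq_canon (xs : List Int) : reduce_symmetric_difference xs = canonOf xs := rfl

theorem predA_eq (error_obs : List Int) (c : List (List Int)) :
    (PySem.Set.equal (PySem.Set.ofList (reduce_set_symmetric_difference c))
      (PySem.Set.ofList (reduce_symmetric_difference error_obs)))
    = decide (canonOf c.flatten = canonOf error_obs) := by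
  by_cases h : canonOf c.flatten = canonOf error_obs
  · simp only [h, decide_true]
    rw [PySem.Set.equal_iff]
    intro x
    simp [PySem.Set.mem_ofList, reduce_set_symmetric_difference, rsd_eq_canon, h]
  · simp only [h, decide_false]
    rw [Bool.eq_false_iff]
    intro hq
    apply h
    rw [PySem.Set.equal_iff] at hq
    rw [canonOf_eq_iff]
    intro v
    have := hq v
    simpa [PySem.Set.mem_ofList, reduce_set_symmetric_difference, rsd_eq_canon, mem_canonOf] using this

theorem pvAssignments_eq (L : List (List (List Int))) : pvAssignments L = pyProductA L := by
  induction L with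
  | nil => rfl
  | cons l ls ih => simp [pvAssignments, pyProductA, ← ih]

theorem mem_pyProductA_cons (l : List (List Int)) (ls : List (List (List Int))) (c : List (List Int)) :
    c ∈ pyProductA (l :: ls) ↔ ∃ x ∈ l, ∃ c', c' ∈ pyProductA ls ∧ c = x :: c' := by
  simp [pyProductA, List.mem_flatMap, List.mem_map, eq_comm]

-- the soundness/completeness invariant of the DP dictionary
def GoodD (L : List (List (List Int))) (d : PySem.Dict (List Int) (List (List Int))) : Prop :=
  d.keys.Nodup ∧
  (∀ s tl, d.get? s = some tl → tl ∈ pyProductA L ∧ canonOf tl.flatten = s) ∧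
  (∀ c ∈ pyProductA L, (d.get? (canonOf c.flatten)).isSome = true)

-- proof-only views of bStep's two nested loops
def s2k (opt s : List Int) : List Int :=
  PySem.List.sorted (PySem.Set.symmDiff s (canonOf opt)) (fun x => x) false

def bInner (opt : List Int) (items : List (List Int × List (List Int)))
    (new : PySem.Dict (List Int) (List (List Int))) : PySem.Dict (List Int) (List (List Int)) :=
  items.foldl (fun new p =>
    if new.contains (s2k opt p.1) then new else new.insert (s2k opt p.1) (opt :: p.2)) new

theorem bStep_eq (d : PySem.Dict (List Int) (List (List Int))) (l : List (List Int)) :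
    bStep d l = l.foldl (fun new opt => bInner opt d.items new) PySem.Dict.empty := rfl

theorem bInner_mono (opt : List Int) (items : List (List Int × List (List Int)))
    (new : PySem.Dict (List Int) (List (List Int))) (k : List Int)
    (h : ((new.get? k).isSome : Bool) = true) : ((bInner opt items new).get? k).isSome = true := by
  induction items generalizing new with
  | nil => exact h
  | cons p ps ih =>
    show ((bInner opt ps _).get? k).isSome = true
    apply ih
    dsimp only
    split
    · exact h
    · rw [PySem.Dict.get?_insert]
      split
      · rfl
      · exact h

theorem bInner_nodup (opt : List Int) (items : List (List Int × List (List Int)))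
    (new : PySem.Dict (List Int) (List (List Int))) (h : new.keys.Nodup) :
    (bInner opt items new).keys.Nodup := by
  induction items generalizing new with
  | nil => exact h
  | cons p ps ih =>
    show (bInner opt ps _).keys.Nodup
    apply ih
    dsimp only
    split
    · exact h
    · exact PySem.Dict.nodup_keys_insert _ _ _ h

theorem bInner_sound (P : List Int → List (List Int) → Prop) (opt : List Int)
    (items : List (List Int × List (List Int))) (new : PySem.Dict (List Int) (List (List Int)))
    (hins : ∀ p ∈ items, P (s2k opt p.1) (opt :: p.2))
    (hnew : ∀ s tl, new.get? s = some tl → P s tl) :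
    ∀ s tl, (bInner opt items new).get? s = some tl → P s tl := by
  induction items generalizing new with
  | nil => exact hnew
  | cons p ps ih =>
    intro s tl hget
    refine ih _ (fun q hq => hins q (List.mem_cons_of_mem _ hq)) ?_ s tl hget
    intro s' tl' hget'
    dsimp only at hget'
    split at hget'
    · exact hnew _ _ hget'
    · rw [PySem.Dict.get?_insert] at hget'
      by_cases hs : s' = s2k opt p.1
      · rw [if_pos hs] at hget'
        cases hget'
        rw [hs]
        exact hins p (List.mem_cons_self ..)
      · rw [if_neg hs] at hget'
        exact hnew _ _ hget'

theorem bInner_hit (opt : List Int) (items : List (List Int × List (List Int)))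
    (new : PySem.Dict (List Int) (List (List Int))) (p : List Int × List (List Int))
    (hp : p ∈ items) : ((bInner opt items new).get? (s2k opt p.1)).isSome = true := by
  induction items generalizing new with
  | nil => cases hp
  | cons q qs ih =>
    rcases List.mem_cons.mp hp with hpq | hp'
    · subst hpq
      show ((bInner opt qs _).get? _).isSome = true
      apply bInner_mono
      dsimp only
      split
      · rename_i hcon
        rw [← PySem.Dict.contains_eq_isSome_get?]
        exact hcon
      · rw [PySem.Dict.get?_insert_self]
        rfl
    · exact ih _ hp'

theorem outer_mono (d : PySem.Dict (List Int) (List (List Int))) (l : List (List Int))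
    (new : PySem.Dict (List Int) (List (List Int))) (k : List Int)
    (h : ((new.get? k).isSome : Bool) = true) :
    ((l.foldl (fun new opt => bInner opt d.items new) new).get? k).isSome = true := by
  induction l generalizing new with
  | nil => exact h
  | cons x xs ih => exact ih _ (bInner_mono _ _ _ _ h)

theorem outer_nodup (d : PySem.Dict (List Int) (List (List Int))) (l : List (List Int))
    (new : PySem.Dict (List Int) (List (List Int))) (h : new.keys.Nodup) :
    (l.foldl (fun new opt => bInner opt d.items new) new).keys.Nodup := by
  induction l generalizing new with
  | nil => exact h
  | cons x xs ih => exact ih _ (bInner_nodup _ _ _ h)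

theorem outer_sound (P : List Int → List (List Int) → Prop)
    (d : PySem.Dict (List Int) (List (List Int))) (l : List (List Int))
    (new : PySem.Dict (List Int) (List (List Int)))
    (hins : ∀ opt ∈ l, ∀ p ∈ d.items, P (s2k opt p.1) (opt :: p.2))
    (hnew : ∀ s tl, new.get? s = some tl → P s tl) :
    ∀ s tl, (l.foldl (fun new opt => bInner opt d.items new) new).get? s = some tl → P s tl := by
  induction l generalizing new with
  | nil => exact hnew
  | cons x xs ih =>
    exact ih _ (fun o ho => hins o (List.mem_cons_of_mem _ ho))
      (bInner_sound P x d.items new (hins x (List.mem_cons_self ..)) hnew)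

theorem outer_hit (d : PySem.Dict (List Int) (List (List Int))) (l : List (List Int))
    (new : PySem.Dict (List Int) (List (List Int))) (x : List Int) (hx : x ∈ l)
    (p : List Int × List (List Int)) (hp : p ∈ d.items) :
    ((l.foldl (fun new opt => bInner opt d.items new) new).get? (s2k x p.1)).isSome = true := by
  induction l generalizing new with
  | nil => cases hx
  | cons y ys ih =>
    rcases List.mem_cons.mp hx with hxy | hx'
    · subst hxy
      exact outer_mono d ys _ _ (bInner_hit x d.items new p hp)
    · exact ih _ hx'

theorem step_good (l : List (List Int)) (ls : List (List (List Int)))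
    (d : PySem.Dict (List Int) (List (List Int))) (h : GoodD ls d) : GoodD (l :: ls) (bStep d l) := by
  obtain ⟨hnd, hsound, hcomp⟩ := h
  have hins : ∀ opt ∈ l, ∀ p ∈ d.items,
      (opt :: p.2) ∈ pyProductA (l :: ls) ∧ canonOf (opt :: p.2).flatten = s2k opt p.1 := by
    intro opt hopt p hp
    have hget : d.get? p.1 = some p.2 :=
      (PySem.Dict.get?_eq_some_iff_mem_items d p.1 p.2 hnd).mpr (by simpa using hp)
    obtain ⟨hmem, hcan⟩ := hsound _ _ hget
    refine ⟨(mem_pyProductA_cons l ls _).mpr ⟨opt, hopt, p.2, hmem, rfl⟩, ?_⟩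
    have := canon_symmDiff p.1 (canonOf opt) p.2.flatten opt hcan.symm (rfl)
    rw [s2k, this, canonOf_comm]
    simp
  refine ⟨?_, ?_, ?_⟩
  · rw [bStep_eq]
    exact outer_nodup d l _ (by simp [PySem.Dict.keys_empty])
  · rw [bStep_eq]
    refine outer_sound _ d l _ hins ?_
    intro s tl hget
    rw [PySem.Dict.get?_empty] at hget
    cases hget
  · intro c hc
    obtain ⟨x, hx, c', hc', rfl⟩ := (mem_pyProductA_cons l ls c).mp hc
    obtain ⟨tl, htl⟩ := Option.isSome_iff_exists.mp (hcomp c' hc')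
    have hpitems : ((canonOf c'.flatten, tl) : List Int × List (List Int)) ∈ d.items :=
      (PySem.Dict.get?_eq_some_iff_mem_items d _ tl hnd).mp htl
    have hkey : s2k x (canonOf c'.flatten) = canonOf (x :: c').flatten := by
      have := canon_symmDiff (canonOf c'.flatten) (canonOf x) c'.flatten x rfl (rfl)
      rw [s2k, this, canonOf_comm]
      simp
    rw [bStep_eq, ← hkey]
    exact outer_hit d l _ x hx (canonOf c'.flatten, tl) hpitems

theorem good_foldr (L : List (List (List Int))) :
    GoodD L (L.foldr (fun x acc => bStep acc x) ((PySem.Dict.empty).insert ([] : List Int) ([] : List (List Int)))) := by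
  induction L with
  | nil =>
    refine ⟨?_, ?_, ?_⟩
    · exact PySem.Dict.nodup_keys_insert _ _ _ (by simp [PySem.Dict.keys_empty])
    · intro s tl hget
      simp only [List.foldr_nil] at hget
      rw [PySem.Dict.get?_insert] at hget
      split at hget
      · rename_i hs
        cases hget
        subst hs
        refine ⟨by simp [pyProductA], by simp [canonOf, PySem.Set.empty, PySem.List.sorted]⟩
      · simp [PySem.Dict.get?_empty] at hget
    · intro c hc
      simp only [pyProductA, List.mem_singleton] at hc
      subst hc
      simp only [List.foldr_nil, List.flatten_nil]
      simp [canonOf, PySem.Set.empty, PySem.List.sorted, PySem.Dict.get?_insert_self]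
  | cons l ls ih =>
    exact step_good l ls _ ih

-- ===== VERDICT (by name: the statement is the Claim_ definition above) =====
theorem get_component_obs_matching_undecomposed_obs_spec : Claim_equal_get_component_obs_matching_undecomposed_obs := by
  intro L e _hDom hPre
  unfold Spec_get_component_obs_matching_undecomposed_obs
  unfold Pre_get_component_obs_matching_undecomposed_obs at hPre
  rw [pvAssignments_eq L] at hPre
  have hGood : GoodD L ((L.reverse).foldl bStep ((PySem.Dict.empty).insert [] [])) := by
    rw [List.foldl_reverse]
    exact good_foldr L
  obtain ⟨_hnd, hSound, hComplete⟩ := hGood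
  show (pyProductA L).find? _ = _
  rw [show (fun obs_combinations => PySem.Set.equal (PySem.Set.ofList (reduce_set_symmetric_difference obs_combinations)) (PySem.Set.ofList (reduce_symmetric_difference e))) = (fun c => decide (canonOf c.flatten = canonOf e)) from funext (predA_eq e)]
  show _ = ((L.reverse).foldl bStep ((PySem.Dict.empty).insert [] [])).get? (canonOf e)
  cases hfind : (pyProductA L).find? (fun c => decide (canonOf c.flatten = canonOf e)) with
  | some c =>
    have hmem := List.mem_of_find?_eq_some hfind
    have hpred : canonOf c.flatten = canonOf e := by
      have := List.find?_some hfind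
      simpa using this
    have := hComplete c hmem
    rw [hpred] at this
    obtain ⟨tl, htl⟩ := Option.isSome_iff_exists.mp this
    obtain ⟨htlmem, htlc⟩ := hSound _ _ htl
    rw [htl]
    have : tl = c := hPre tl htlmem c hmem htlc hpred
    rw [this]
  | none =>
    cases hB : ((L.reverse).foldl bStep ((PySem.Dict.empty).insert [] [])).get? (canonOf e) with
    | none => rfl
    | some tl =>
      obtain ⟨htlmem, htlc⟩ := hSound _ _ hB
      have := List.find?_eq_none.mp hfind tl htlmem
      simp [htlc] at this
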